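-- pv_equiv track=rewrite | github.com/h2r/Lang2LTL | formula_sampler.py | always
-- ===== SOURCE A (Python) =====
-- def always(props, negate=False):
--     """
--     Conjunction of always.
--     """
--     if negate:
--         operator = "G !"
--     else:
--         operator = "G"
--     if len(props) == 1:
--         return f"{operator} {props[0]}"
--     return f"& {operator} {props.pop(0)} {always(props, negate)}"
-- ===== SOURCE B (Python) =====
-- def always(props, negate=False):
--     """Conjunction of always (iterative)."""
--     operator = "G !" if negate else "G"
--     parts = []
--     while len(props) > 1:
--         parts.append(f"& {operator} {props.pop(0)}")
--     parts.append(f"{operator} {props[0]}")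
--     return " ".join(parts)
-- ===== Notes on version B (the rewrite author's own statement) =====
-- stated objective: idiomatic
-- what changed: Replaced the recursion with an iterative while-loop that collects the '& G p' parts in a list and joins them once, keeping the identical pop(0) mutation and spacing.
import Mathlib
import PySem

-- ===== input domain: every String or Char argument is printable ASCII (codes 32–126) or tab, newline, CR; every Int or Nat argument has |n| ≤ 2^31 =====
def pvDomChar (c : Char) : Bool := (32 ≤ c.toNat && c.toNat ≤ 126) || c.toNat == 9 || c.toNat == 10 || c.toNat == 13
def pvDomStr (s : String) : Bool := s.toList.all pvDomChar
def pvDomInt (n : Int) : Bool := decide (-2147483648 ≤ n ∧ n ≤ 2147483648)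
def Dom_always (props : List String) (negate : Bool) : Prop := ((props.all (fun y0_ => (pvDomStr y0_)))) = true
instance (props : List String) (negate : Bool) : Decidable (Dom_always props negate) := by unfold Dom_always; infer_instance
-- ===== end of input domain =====

-- ===== PORT A =====
-- Header: B replaces A's recursion with an iterative loop + join (idiomatic); equivalence is
-- about the RETURN value; both Pythons mutate props identically (pop(0) down to one element).
-- Literal port of A: recurse, prepending "& operator p"; Python raises IndexError on [],
-- which Pre_always excludes (the [] branch here is unreachable inside Pre_).
def always (props : List String) (negate : Bool) : String :=
  let operator := if negate then "G !" else "G"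
  match props with
  | [p] => operator ++ " " ++ p
  | p :: rest => "& " ++ operator ++ " " ++ p ++ " " ++ always rest negate
  | [] => ""

-- ===== PORT B =====
-- the while-loop of Source B: pops the head while more than one element remains, accumulating parts
def always_alt_loop (operator : String) (props : List String) (parts : List String) : List String :=
  match props with
  | p :: rest@(_ :: _) => always_alt_loop operator rest (parts ++ ["& " ++ operator ++ " " ++ p])
  | [p] => parts ++ [operator ++ " " ++ p]
  | [] => parts

-- " ".join, ported by hand (exact: joins the parts with single spaces)
def joinSpace (parts : List String) : String :=
  match parts with
  | [] => ""
  | [x] => x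
  | x :: y :: rest => x ++ " " ++ joinSpace (y :: rest)

def always_alt (props : List String) (negate : Bool) : String :=
  let operator := if negate then "G !" else "G"
  joinSpace (always_alt_loop operator props [])

-- ===== PRECONDITION & SPEC =====
-- Pre_ excludes the empty list, on which both Pythons raise IndexError.
def Pre_always (props : List String) (negate : Bool) : Prop := props ≠ []
instance (props : List String) (negate : Bool) : Decidable (Pre_always props negate) := by unfold Pre_always; infer_instance
def pvWitness_always : List String × Bool := (["a", "b"], true)
def Spec_always (props : List String) (negate : Bool) (out : String) : Prop := out = always_alt props negate
instance (props : List String) (negate : Bool) (out : String) : Decidable (Spec_always props negate out) := by unfold Spec_always; infer_instance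

-- ===== CLAIM (what is proved, stated in full; the proofs are below) =====
def Claim_equal_always : Prop := ∀ (props : List String) (negate : Bool), Dom_always props negate → Pre_always props negate → Spec_always props negate (always props negate)

-- ===== LEMMAS AND PROOFS =====
theorem always_alt_loop_acc (operator : String) (props parts : List String) :
    always_alt_loop operator props parts = parts ++ always_alt_loop operator props [] := by
  induction props generalizing parts with
  | nil => simp [always_alt_loop]
  | cons p rest ih =>
    cases rest with
    | nil => simp [always_alt_loop]
    | cons q qs =>
      rw [always_alt_loop, always_alt_loop]
      rw [ih (parts ++ _), ih ([] ++ _)]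
      simp

theorem always_alt_loop_ne_nil (operator : String) (props : List String) (h : props ≠ []) :
    always_alt_loop operator props [] ≠ [] := by
  induction props with
  | nil => exact absurd rfl h
  | cons p rest ih =>
    cases rest with
    | nil => simp [always_alt_loop]
    | cons q qs =>
      rw [always_alt_loop, always_alt_loop_acc]
      simp

theorem always_eq_loop (operator : String) (negate : Bool) (props : List String)
    (hop : operator = if negate then "G !" else "G") (h : props ≠ []) :
    always props negate = joinSpace (always_alt_loop operator props []) := by
  induction props with
  | nil => exact absurd rfl h
  | cons p rest ih =>
    cases rest with
    | nil =>
      simp [always, always_alt_loop, hop, joinSpace]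
    | cons q qs =>
      have hrest : (q :: qs : List String) ≠ [] := by simp
      rw [always_alt_loop, always_alt_loop_acc]
      have hne := always_alt_loop_ne_nil operator (q :: qs) hrest
      obtain ⟨x, xs, hx⟩ := List.exists_cons_of_ne_nil hne
      rw [hx]
      show always (p :: q :: qs) negate = joinSpace (("& " ++ operator ++ " " ++ p) :: x :: xs)
      rw [joinSpace]
      have := ih hrest
      rw [hx] at this
      simp only [always, hop]
      rw [this]

-- ===== VERDICT (by name: the statement is the Claim_ definition above) =====
theorem always_spec : Claim_equal_always := by
  intro props negate _ hpre
  unfold Spec_always always_alt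
  exact always_eq_loop _ negate props rfl hpre
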